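-- pv_equiv track=rewrite | github.com/chillbot-io/openlabels | scrubiq/files/document_templates.py | validate_passport_mrz
-- ===== SOURCE A (Python) =====
-- from typing import Dict, List, Optional, Tuple
--
-- def validate_passport_mrz(mrz_lines: List[str]) -> bool:
--     """
--     Validate passport MRZ (Machine Readable Zone).
--
--     TD3 format (passport): 2 lines of 44 characters each.
--     """
--     if len(mrz_lines) != 2:
--         return False
--
--     if len(mrz_lines[0]) != 44 or len(mrz_lines[1]) != 44:
--         return False
--
--     # Line 1: P<COUNTRY<SURNAME<<GIVEN<NAMES<<<...
--     line1 = mrz_lines[0]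
--     if line1[0] != 'P':
--         return False
--
--     # Line 2 has check digits at positions 9, 19, 43 (0-indexed)
--     line2 = mrz_lines[1]
--
--     # Basic format check - should be alphanumeric and <
--     valid_chars = set('ABCDEFGHIJKLMNOPQRSTUVWXYZ0123456789<')
--     if not all(c in valid_chars for c in line1 + line2):
--         return False
--
--     return True
-- ===== SOURCE B (Python) =====
-- import re
--
-- _LINE1_RE = re.compile(r'P[A-Z0-9<]{43}')
-- _LINE2_RE = re.compile(r'[A-Z0-9<]{44}')
--
--
-- def validate_passport_mrz(mrz_lines):
--     """Validate passport MRZ (TD3: 2 lines x 44 chars) via regex full-match."""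
--     if len(mrz_lines) != 2:
--         return False
--     return bool(_LINE1_RE.fullmatch(mrz_lines[0]) and _LINE2_RE.fullmatch(mrz_lines[1]))
-- ===== Notes on version B (the rewrite author's own statement) =====
-- stated objective: idiomatic
-- what changed: Replaces the chain of explicit guards (length checks, first-character compare, set-membership scan over the concatenated lines) with two anchored regex full-matches that encode length, leading 'P' and the allowed alphabet in the patterns.
import Mathlib
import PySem

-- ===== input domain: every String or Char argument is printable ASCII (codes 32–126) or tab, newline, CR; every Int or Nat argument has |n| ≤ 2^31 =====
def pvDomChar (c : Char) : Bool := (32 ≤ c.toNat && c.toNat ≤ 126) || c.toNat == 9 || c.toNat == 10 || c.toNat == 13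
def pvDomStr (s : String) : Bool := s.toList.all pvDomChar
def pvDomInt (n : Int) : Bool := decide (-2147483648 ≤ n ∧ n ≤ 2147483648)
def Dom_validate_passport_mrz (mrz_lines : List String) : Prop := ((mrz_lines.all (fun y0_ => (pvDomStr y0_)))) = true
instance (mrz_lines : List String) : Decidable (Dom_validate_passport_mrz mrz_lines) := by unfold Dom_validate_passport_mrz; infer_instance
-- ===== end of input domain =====

-- B replaces A's explicit guards + set-membership scan with two anchored regex full-matches (idiomatic rewrite; return value only).
-- ===== PORT A =====
def pvValidChars : PySem.Set Char :=
  PySem.Set.ofList "ABCDEFGHIJKLMNOPQRSTUVWXYZ0123456789<".toList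

def validate_passport_mrz (mrz_lines : List String) : Bool :=
  -- the match encodes 'if len(mrz_lines) != 2: return False' plus the two indexings mrz_lines[0]/[1]
  match mrz_lines with
  | [line1, line2] =>
    if PySem.Str.len line1 != 44 || PySem.Str.len line2 != 44 then false
    else if PySem.Str.pyGet? line1 0 != some 'P' then false
    else if !((line1.toList ++ line2.toList).all (fun c => PySem.Set.contains pvValidChars c)) then false
    else true
  | _ => false

-- ===== PORT B =====
-- exact port of the regex character class [A-Z0-9<]: code points 65-90, 48-57, 60
def pvIsMrzChar (c : Char) : Bool :=
  (65 ≤ c.toNat && c.toNat ≤ 90) || (48 ≤ c.toNat && c.toNat ≤ 57) || c.toNat == 60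

-- exact port of re.fullmatch(r'P[A-Z0-9<]{43}', s): anchored, first char 'P', then exactly 43 class characters
def pvFullmatchLine1 (s : String) : Bool :=
  s.toList.headD ' ' == 'P' && (s.toList.tail.length == 43 && s.toList.tail.all pvIsMrzChar)

-- exact port of re.fullmatch(r'[A-Z0-9<]{44}', s): anchored, exactly 44 class characters
def pvFullmatchLine2 (s : String) : Bool :=
  s.toList.length == 44 && s.toList.all pvIsMrzChar

def validate_passport_mrz_alt (mrz_lines : List String) : Bool :=
  -- 'if len(mrz_lines) != 2: return False'; the guard puts indices 0 and 1 in range, so pyGetD is exact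
  if PySem.List.len mrz_lines != 2 then false
  else pvFullmatchLine1 (PySem.List.pyGetD mrz_lines 0 "") && pvFullmatchLine2 (PySem.List.pyGetD mrz_lines 1 "")

-- ===== PRECONDITION & SPEC =====
def Spec_validate_passport_mrz (mrz_lines : List String) (out : Bool) : Prop := out = validate_passport_mrz_alt mrz_lines
instance (mrz_lines : List String) (out : Bool) : Decidable (Spec_validate_passport_mrz mrz_lines out) := by unfold Spec_validate_passport_mrz; infer_instance

-- ===== CLAIM (what is proved, stated in full; the proofs are below) =====
def Claim_equal_validate_passport_mrz : Prop := ∀ (mrz_lines : List String), Dom_validate_passport_mrz mrz_lines → Spec_validate_passport_mrz mrz_lines (validate_passport_mrz mrz_lines)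

-- ===== LEMMAS AND PROOFS =====

-- membership in A's set of valid characters coincides with B's regex character class
lemma pvValidChars_contains_eq (c : Char) :
    PySem.Set.contains pvValidChars c = pvIsMrzChar c := by
  have h : pvValidChars = ['A', 'B', 'C', 'D', 'E', 'F', 'G', 'H', 'I', 'J', 'K', 'L', 'M', 'N', 'O', 'P', 'Q', 'R', 'S', 'T', 'U', 'V', 'W', 'X', 'Y', 'Z', '0', '1', '2', '3', '4', '5', '6', '7', '8', '9', '<'] := by decide
  have hinj : ∀ d : Char, (c = d) ↔ (c.toNat = d.toNat) := by
    intro d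
    constructor
    · rintro rfl; rfl
    · intro hn; exact Char.ext (UInt32.toNat_inj.mp hn)
  rw [h, Bool.eq_iff_iff]
  simp only [PySem.Set.contains, List.contains_eq_mem, List.mem_cons, List.not_mem_nil, or_false,
    hinj, pvIsMrzChar, Bool.or_eq_true, Bool.and_eq_true, decide_eq_true_eq, beq_iff_eq,
    Char.reduceToNat]
  omega

-- ===== VERDICT (by name: the statement is the Claim_ definition above) =====
theorem validate_passport_mrz_spec : Claim_equal_validate_passport_mrz := by
  intro mrz_lines _
  unfold Spec_validate_passport_mrz
  match mrz_lines with
  | [] => rfl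
  | [_] => rfl
  | a :: b :: c :: t =>
    have h2 : (PySem.List.len (a :: b :: c :: t) != 2) = true := by
      simp [PySem.List.len]
      omega
    simp only [validate_passport_mrz, validate_passport_mrz_alt, h2, if_pos]
  | [line1, line2] =>
    have halt : validate_passport_mrz_alt [line1, line2]
        = (pvFullmatchLine1 line1 && pvFullmatchLine2 line2) := rfl
    rw [halt]
    unfold validate_passport_mrz
    dsimp only
    cases hL : line1.toList with
    | nil =>
      have hlen : PySem.Str.len line1 = 0 := by
        simp [PySem.Str.len_eq, hL]
      rw [hlen]
      simp [pvFullmatchLine1, hL]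
    | cons c rest =>
      simp only [pvFullmatchLine1, pvFullmatchLine2, hL, List.headD_cons, List.tail_cons]
      have hget : PySem.Str.pyGet? line1 0 = some c := by
        simp [hL]
      have hlen1 : PySem.Str.len line1 = (rest.length : Int) + 1 := by
        simp [PySem.Str.len_eq, hL]
      have hlen2 : PySem.Str.len line2 = (line2.toList.length : Int) := by
        simp [PySem.Str.len_eq]
      rw [hget, hlen1, hlen2, Bool.eq_iff_iff]
      by_cases hc : c = 'P'
      · subst hc
        have hP : pvIsMrzChar 'P' = true := by decide
        simp only [List.cons_append, List.all_cons, List.all_append, pvValidChars_contains_eq,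
          hP, Bool.true_and, Bool.or_eq_true, Bool.not_eq_eq_eq_not, Bool.not_true,
          bne_eq_false_iff_eq, bne_iff_ne, ne_eq, beq_self_eq_true, Bool.and_eq_true,
          beq_iff_eq, Option.some.injEq, decide_eq_true_eq]
        constructor
        · intro h
          split_ifs at h with h1 h2 h3
          simp only [Bool.not_eq_false, Bool.and_eq_true] at h3
          push Not at h1
          exact ⟨⟨by omega, h3.1⟩, by omega, h3.2⟩
        · rintro ⟨⟨hr, hra⟩, hl2, hl2a⟩
          rw [if_neg (by omega), if_neg (by simp), if_neg (by simp [hra, hl2a])]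
      · have hcb : (c == 'P') = false := by simp [hc]
        simp only [hcb, Bool.false_and, Bool.false_eq_true, iff_false]
        intro h
        split_ifs at h with h1 h2 h3
        exact hc (by simpa using h2)
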